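-- pv_equiv track=rewrite | github.com/changlidavid/practice-platform | final/1754923206907sYV/期末整理/简单_数字题/24T3.py | f
-- ===== SOURCE A (Python) =====
-- def f(n):
--     """
--     Removes all even digits from a number, preserving the sign of the original number.
--     If the result has no digits (all were even), returns 0.
--
--     Args:
--         n: An integer
--
--     Returns:
--         An integer with all even digits of n removed
--
--     >>> f(-12345667)
--     -1357
--     >>> f(0)
--     0
--     >>> f(1)
--     1
--     >>> f(12334503)
--     13353
--     >>> f(2468)
--     0
--     >>> f(-2468)
--     0
--     >>> f(123456789)
--     13579
--     >>> f(-987654321)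
--     -97531
--     >>> f(10203040)
--     13
--     >>> f(9876543210)
--     97531
--     """
--     if n == 0:
--         return 0
--     elif n % 2 != 0 and len(str(n)) == 1:
--         return n
--     else:
--         L = []
--         for i in str(abs(n)):
--             L.append(i)
--         L1 = []
--         for i in L:
--             if int(i) % 2 != 0:
--                 L1.append(i)
--         if len(L1) == 0:
--             return 0
--         num = int("".join(L1))
--         if n > 0:
--             return num
--         else:
--             return -num
-- ===== SOURCE B (Python) =====
-- def f(n):
--     """Remove the even digits of n, keeping its sign; 0 if no odd digit remains.
--
--     Pure arithmetic: extract digits of abs(n) least-significant first with divmod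
--     and rebuild the odd ones with a growing place multiplier (no str()).
--     """
--     if n == 0:
--         return 0
--     m = abs(n)
--     result = 0
--     place = 1
--     while m > 0:
--         m, d = divmod(m, 10)
--         if d % 2 != 0:
--             result += d * place
--             place *= 10
--     return result if n > 0 else -result
-- ===== Notes on version B (the rewrite author's own statement) =====
-- stated objective: alternative
-- what changed: Replaces string conversion, two list-building passes and re-parsing via int() with a single arithmetic divmod loop that extracts digits of abs(n) and rebuilds the odd ones with a place-value multiplier.
import Mathlib
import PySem

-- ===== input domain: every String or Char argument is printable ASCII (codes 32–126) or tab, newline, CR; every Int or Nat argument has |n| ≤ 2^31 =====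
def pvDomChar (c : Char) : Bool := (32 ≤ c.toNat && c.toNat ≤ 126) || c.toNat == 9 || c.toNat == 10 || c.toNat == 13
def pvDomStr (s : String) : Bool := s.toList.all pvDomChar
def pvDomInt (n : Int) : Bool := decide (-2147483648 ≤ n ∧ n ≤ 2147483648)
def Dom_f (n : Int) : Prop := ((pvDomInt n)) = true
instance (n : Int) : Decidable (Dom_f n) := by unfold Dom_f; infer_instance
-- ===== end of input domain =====

-- B removes the even digits with an arithmetic divmod loop instead of A's
-- string conversion / char-list filtering / int() re-parsing; return values agree on all ints.

-- ===== PORT A =====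
-- int(c) for the single char c taken from str(abs(n)) — always a pure ASCII digit there,
-- on which int() is exactly the digit value. The prelude's full int() parser (ofStr?) keeps
-- its inner digit-list reader private, so this guaranteed-single-digit case is ported
-- through PySem.Int.digitVal?, the prelude's own digit-char value (exact on digit chars).
def pyIntDigit (c : Char) : Int := ((PySem.Int.digitVal? c).getD 0 : Nat)

-- int("".join(L1)) for the nonempty pure-ASCII-digit char list L1 (the only case reached:
-- emptiness is checked just before, and the chars come from str(abs(n))): on that domain
-- int() is exactly the base-10 value of the digits, ported as a left fold of digit values.
def pyIntOfDigitChars (cs : List Char) : Int :=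
  cs.foldl (fun acc c => 10 * acc + pyIntDigit c) 0

def f (n : Int) : Int :=
  if n = 0 then 0
  else if PySem.Int.mod n 2 ≠ 0 ∧ (PySem.Int.toChars n).length = 1 then n
  else
    let L : List Char := (PySem.Int.toChars (n.natAbs : Int)).foldl (fun acc c => acc ++ [c]) []
    let L1 : List Char := L.foldl (fun acc c => if PySem.Int.mod (pyIntDigit c) 2 ≠ 0 then acc ++ [c] else acc) []
    if L1.length = 0 then 0
    else
      let num : Int := pyIntOfDigitChars L1
      if n > 0 then num else -num

-- ===== PORT B =====
-- while m > 0: m, d = divmod(m, 10); if d % 2 != 0: result += d * place; place *= 10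
-- (m = abs(n) ≥ 0 throughout, so the loop state lives in Nat and divmod is Nat divmod)
def fAltLoop (m : Nat) (result place : Int) : Int :=
  if h : m = 0 then result
  else
    let d : Nat := m % 10
    let m' : Nat := m / 10
    if d % 2 ≠ 0 then fAltLoop m' (result + (d : Int) * place) (place * 10)
    else fAltLoop m' result place
decreasing_by all_goals exact Nat.div_lt_self (Nat.pos_of_ne_zero h) (by norm_num)

def f_alt (n : Int) : Int :=
  if n = 0 then 0
  else
    let r := fAltLoop n.natAbs 0 1
    if n > 0 then r else -r

-- ===== PRECONDITION & SPEC =====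
def Spec_f (n : Int) (out : Int) : Prop := out = f_alt n
instance (n : Int) (out : Int) : Decidable (Spec_f n out) := by unfold Spec_f; infer_instance

-- ===== CLAIM (what is proved, stated in full; the proofs are below) =====
def Claim_equal_f : Prop := ∀ (n : Int), Dom_f n → Spec_f n (f n)

-- ===== LEMMAS AND PROOFS =====

-- the odd digits of m, least significant first
def oddDigits (m : Nat) : List Nat := (Nat.digits 10 m).filter (fun d => d % 2 == 1)

-- B's loop accumulates exactly the base-10 value of the odd-digit list
theorem fAltLoop_eq (m : Nat) : ∀ (r p : Int),
    fAltLoop m r p = r + p * (Nat.ofDigits 10 (oddDigits m) : Int) := by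
  induction m using Nat.strong_induction_on with
  | _ m ih =>
    intro r p
    rw [fAltLoop]
    by_cases h : m = 0
    · simp [h, oddDigits, Nat.ofDigits]
    · have hrec := ih (m / 10) (Nat.div_lt_self (Nat.pos_of_ne_zero h) (by norm_num))
      have hd : Nat.digits 10 m = m % 10 :: Nat.digits 10 (m / 10) :=
        Nat.digits_def' (by norm_num) (Nat.pos_of_ne_zero h)
      simp only [h, dif_neg, not_false_iff]
      by_cases hodd : m % 10 % 2 ≠ 0
      · have h1 : (m % 10 % 2 == 1) = true := by simp; omega
        simp only [if_pos hodd, hrec]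
        unfold oddDigits
        rw [hd]
        simp only [List.filter_cons, h1, if_true]
        rw [show (Nat.ofDigits (10:Int) (m % 10 :: List.filter (fun d => d % 2 == 1) (Nat.digits 10 (m / 10)))) = ((m % 10 : Nat) : Int) + 10 * Nat.ofDigits 10 (List.filter (fun d => d % 2 == 1) (Nat.digits 10 (m / 10))) from rfl]
        ring
      · have h1 : (m % 10 % 2 == 1) = false := by simp; omega
        simp only [if_neg hodd, hrec]
        unfold oddDigits
        rw [hd]
        simp only [List.filter_cons, h1, if_false, Bool.false_eq_true]

-- core's toDigitsCore, given enough fuel, is the reversed digit-char list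
theorem toDigitsCore_eq (fuel : Nat) : ∀ (n : Nat) (ds : List Char), 0 < n → n < fuel →
    Nat.toDigitsCore 10 fuel n ds = ((Nat.digits 10 n).map Nat.digitChar).reverse ++ ds := by
  induction fuel with
  | zero => intro n ds h1 h2; omega
  | succ fuel ih =>
    intro n ds h1 h2
    rw [Nat.toDigitsCore]
    have hd : Nat.digits 10 n = n % 10 :: Nat.digits 10 (n / 10) := Nat.digits_def' (by norm_num) h1
    by_cases hz : n / 10 = 0
    · simp only [hz]
      rw [hd, hz]
      simp
    · simp only [if_neg hz]
      rw [ih (n / 10) _ (Nat.pos_of_ne_zero hz) (by have := Nat.div_lt_self h1 (by norm_num : 1 < 10); omega)]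
      rw [hd]
      simp

theorem toDigits_eq (m : Nat) (h : 0 < m) :
    Nat.toDigits 10 m = ((Nat.digits 10 m).map Nat.digitChar).reverse := by
  unfold Nat.toDigits
  rw [toDigitsCore_eq (m + 1) m [] h (by omega)]
  simp

-- int() of a single digit char, through digitVal?, is the digit itself
theorem pyIntDigit_digitChar (d : Nat) (h : d < 10) : pyIntDigit (Nat.digitChar d) = (d : Int) := by
  interval_cases d <;> decide

-- the ported int() on a reversed (big-endian) digit-char list is ofDigits of the digit list
theorem parse_eq (E : List Nat) : ∀ (a : Int), (∀ d ∈ E, d < 10) →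
    (E.map Nat.digitChar).reverse.foldl (fun acc c => 10 * acc + pyIntDigit c) a
      = a * 10 ^ E.length + (Nat.ofDigits 10 E : Int) := by
  induction E with
  | nil => intro a _; simp [Nat.ofDigits]
  | cons d E ih =>
    intro a hlt
    simp only [List.map_cons, List.reverse_cons, List.foldl_append, List.foldl_cons, List.foldl_nil]
    rw [ih a (fun x hx => hlt x (List.mem_cons_of_mem _ hx))]
    rw [pyIntDigit_digitChar d (hlt d (List.mem_cons_self))]
    rw [show (Nat.ofDigits (10:Int) (d :: E)) = (d : Int) + 10 * Nat.ofDigits 10 E from rfl]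
    simp [List.length_cons, pow_succ]
    ring

-- A's parity test on a digit char agrees with parity of the digit
theorem mod_parity (d : Nat) (h : d < 10) :
    (decide (PySem.Int.mod (pyIntDigit (Nat.digitChar d)) 2 ≠ 0)) = (d % 2 == 1) := by
  interval_cases d <;> decide

-- A's char filter over the printed digits is the printed odd-digit filter
theorem filter_digitChar (D : List Nat) (hD : ∀ d ∈ D, d < 10) :
    ((D.map Nat.digitChar).reverse).filter
        (fun c => decide (PySem.Int.mod (pyIntDigit c) 2 ≠ 0))
      = ((D.filter (fun d => d % 2 == 1)).map Nat.digitChar).reverse := by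
  rw [List.filter_reverse, List.filter_map]
  congr 1
  congr 1
  apply List.filter_congr
  intro d hd
  exact mod_parity d (hD d hd)

theorem main_eq (n : Int) : f n = f_alt n := by
  by_cases h0 : n = 0
  · simp [f, f_alt, h0]
  · have hm : 0 < n.natAbs := Int.natAbs_pos.mpr h0
    have hD : ∀ d ∈ Nat.digits 10 n.natAbs, d < 10 :=
      fun d hd => Nat.digits_lt_base (by norm_num) hd
    have hB : f_alt n =
        if n > 0 then (Nat.ofDigits 10 (oddDigits n.natAbs) : Int)
        else -(Nat.ofDigits 10 (oddDigits n.natAbs) : Int) := by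
      unfold f_alt
      rw [if_neg h0, fAltLoop_eq]
      simp
    have htc : PySem.Int.toChars ((n.natAbs : Nat) : Int)
        = ((Nat.digits 10 n.natAbs).map Nat.digitChar).reverse := by
      unfold PySem.Int.toChars
      rw [if_neg (by omega), Int.toNat_natCast, toDigits_eq _ hm]
    unfold f
    rw [if_neg h0]
    by_cases h2 : PySem.Int.mod n 2 ≠ 0 ∧ (PySem.Int.toChars n).length = 1
    · rw [if_pos h2]
      -- A's second branch: n must be a positive single odd digit
      have hpos : 0 < n := by
        rcases lt_or_gt_of_ne h0 with hneg | hpos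
        · exfalso
          have : PySem.Int.toChars n = '-' :: Nat.toDigits 10 n.natAbs := by
            unfold PySem.Int.toChars; rw [if_pos hneg]
          rw [this] at h2
          have h2' := h2.2
          rw [toDigits_eq _ hm] at h2'
          simp at h2'
          exact (Nat.digits_ne_nil_iff_ne_zero.mpr hm.ne') h2'
        · exact hpos
      have hn : n = ((n.natAbs : Nat) : Int) := by omega
      have h2' := h2.2
      have htc' : PySem.Int.toChars n = ((Nat.digits 10 n.natAbs).map Nat.digitChar).reverse := by
        rw [hn] at htc ⊢; exact htc
      rw [htc'] at h2'
      simp at h2'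
      have hd : Nat.digits 10 n.natAbs
          = n.natAbs % 10 :: Nat.digits 10 (n.natAbs / 10) := Nat.digits_def' (by norm_num) hm
      have hz : n.natAbs / 10 = 0 := by
        by_contra hz
        have hne : Nat.digits 10 (n.natAbs / 10) ≠ [] := Nat.digits_ne_nil_iff_ne_zero.mpr hz
        rw [hd] at h2'
        have hlen : (Nat.digits 10 (n.natAbs / 10)).length = 0 := by simpa using h2'
        exact hne (List.length_eq_zero_iff.mp hlen)
      have hdig : Nat.digits 10 n.natAbs = [n.natAbs] := by
        rw [hd, hz]; simp; omega
      have hodd : n.natAbs % 2 = 1 := by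
        have hmod : PySem.Int.mod ((n.natAbs : Nat) : Int) 2 = ((n.natAbs % 2 : Nat) : Int) := by
          exact_mod_cast PySem.Int.mod_natCast n.natAbs 2
        have h21 := h2.1
        rw [hn, hmod] at h21
        omega
      have hW : oddDigits n.natAbs = [n.natAbs] := by
        unfold oddDigits
        rw [hdig]
        simp [hodd]
      rw [hB, if_pos hpos, hW,
        show (Nat.ofDigits (10:Int) [n.natAbs]) = ((n.natAbs : Nat) : Int) + 10 * Nat.ofDigits 10 [] from rfl,
        show (Nat.ofDigits (10:Int) []) = 0 from rfl]
      omega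
    · rw [if_neg h2]
      simp only [PySem.List.foldl_append_singleton, List.nil_append]
      have hfun : (fun (acc : List Char) c => if PySem.Int.mod (pyIntDigit c) 2 ≠ 0 then acc ++ [c] else acc)
          = (fun (acc : List Char) c => if (fun c => decide (PySem.Int.mod (pyIntDigit c) 2 ≠ 0)) c = true then acc ++ [id c] else acc) := by
        funext acc c; simp
      rw [hfun, PySem.List.foldl_append_if, List.nil_append, List.map_id, htc,
        filter_digitChar _ hD]
      by_cases hemp : (Nat.digits 10 n.natAbs).filter (fun d => d % 2 == 1) = []
      · rw [hemp]
        simp only [List.map_nil, List.reverse_nil, List.length_nil]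
        rw [hB]
        have hodde : oddDigits n.natAbs = [] := hemp
        rw [hodde]
        simp [Nat.ofDigits]
      · rw [if_neg (by simp only [List.length_reverse, List.length_map, List.length_eq_zero_iff]; exact hemp)]
        unfold pyIntOfDigitChars
        rw [parse_eq _ 0 (fun d hd => hD d (List.mem_of_mem_filter hd))]
        rw [hB]
        simp [oddDigits]

-- ===== VERDICT (by name: the statement is the Claim_ definition above) =====
theorem f_spec : Claim_equal_f := by
  intro n _
  unfold Spec_f
  exact main_eq n
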